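-- pv_equiv track=rewrite | github.com/hsvpy/AdventOfCode2020 | Chris/Day10/hodges_day10.py | calc_jump_distribution
-- ===== SOURCE A (Python) =====
-- from typing import List, Dict, Generator
--
-- def calc_jump_distribution(adapters: List[int]) -> Dict[int, int]:
--     deltas = [adapters[x+1]-y for x, y in enumerate(adapters) if x+1 < len(adapters)]
--     return_dict = {
--         1: 0,
--         2: 0,
--         3: 0
--     }
--     for difference in range(1, 4):
--         return_dict[difference] = deltas.count(difference)
--     return return_dict
-- ===== SOURCE B (Python) =====
-- def calc_jump_distribution(adapters):
--     return_dict = {1: 0, 2: 0, 3: 0}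
--     for i in range(len(adapters) - 1):
--         delta = adapters[i + 1] - adapters[i]
--         if 1 <= delta <= 3:
--             return_dict[delta] += 1
--     return return_dict
-- ===== Notes on version B (the rewrite author's own statement) =====
-- stated objective: faster
-- what changed: Replaces building the full deltas list plus three separate .count() scans with a single accumulating pass over consecutive index pairs that increments the dict entry directly.
import Mathlib
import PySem

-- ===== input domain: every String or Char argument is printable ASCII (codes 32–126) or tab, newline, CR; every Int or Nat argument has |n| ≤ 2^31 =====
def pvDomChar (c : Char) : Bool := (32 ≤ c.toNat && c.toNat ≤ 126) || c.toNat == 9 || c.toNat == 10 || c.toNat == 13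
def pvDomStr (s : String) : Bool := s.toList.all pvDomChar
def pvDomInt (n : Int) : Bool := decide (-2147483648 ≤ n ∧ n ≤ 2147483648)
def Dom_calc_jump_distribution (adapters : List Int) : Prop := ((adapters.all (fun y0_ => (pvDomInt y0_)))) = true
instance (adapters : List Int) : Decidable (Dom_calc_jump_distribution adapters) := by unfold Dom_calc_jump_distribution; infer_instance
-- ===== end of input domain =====

-- B replaces A's deltas-list construction plus three .count() scans with one accumulating pass over consecutive index pairs (simpler decomposition, same result).

-- ===== PORT A =====
def calc_jump_distribution (adapters : List Int) : List (Int × Int) :=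
  let deltas : List Int :=
    (PySem.List.enumerate adapters).filterMap (fun xy =>
      if xy.1 + 1 < PySem.List.len adapters
      then some (PySem.List.pyGetD adapters (xy.1 + 1) 0 - xy.2)
      else none)
  let return_dict : PySem.Dict Int Int :=
    (((PySem.Dict.empty).insert 1 0).insert 2 0).insert 3 0
  let return_dict :=
    (PySem.List.pyRange 1 4 1).foldl
      (fun d difference => d.insert difference (deltas.count difference : Int)) return_dict
  return_dict.items

-- ===== PORT B =====
def calc_jump_distribution_alt (adapters : List Int) : List (Int × Int) :=
  let return_dict : PySem.Dict Int Int :=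
    (((PySem.Dict.empty).insert 1 0).insert 2 0).insert 3 0
  let return_dict :=
    (PySem.List.pyRange 0 (PySem.List.len adapters - 1) 1).foldl
      (fun d i =>
        let delta := PySem.List.pyGetD adapters (i + 1) 0 - PySem.List.pyGetD adapters i 0
        if 1 ≤ delta ∧ delta ≤ 3 then d.modify delta 0 (· + 1) else d)
      return_dict
  return_dict.items

-- ===== PRECONDITION & SPEC =====
def Spec_calc_jump_distribution (adapters : List Int) (out : List (Int × Int)) : Prop := out = calc_jump_distribution_alt adapters
instance (adapters : List Int) (out : List (Int × Int)) : Decidable (Spec_calc_jump_distribution adapters out) := by unfold Spec_calc_jump_distribution; infer_instance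

-- ===== CLAIM (what is proved, stated in full; the proofs are below) =====
def Claim_equal_calc_jump_distribution : Prop := ∀ (adapters : List Int), Dom_calc_jump_distribution adapters → Spec_calc_jump_distribution adapters (calc_jump_distribution adapters)

-- ===== LEMMAS AND PROOFS =====

-- filterMap of an everywhere-some function is a map
theorem filterMap_eq_map_of_forall {α β : Type} (l : List α) (f : α → Option β) (g : α → β)
    (h : ∀ x ∈ l, f x = some (g x)) : l.filterMap f = l.map g := by
  induction l with
  | nil => rfl
  | cons x t ih =>
    simp only [List.filterMap_cons, h x (by simp), List.map_cons]
    exact congrArg _ (ih (fun y hy => h y (by simp [hy])))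

-- A's deltas list equals the map of B's per-index delta over range 0 (n-1)
theorem deltasA_eq (adapters : List Int) :
    (PySem.List.enumerate adapters).filterMap (fun xy =>
      if xy.1 + 1 < PySem.List.len adapters
      then some (PySem.List.pyGetD adapters (xy.1 + 1) 0 - xy.2)
      else none)
    = (PySem.List.pyRange 0 (PySem.List.len adapters - 1) 1).map
        (fun i => PySem.List.pyGetD adapters (i + 1) 0 - PySem.List.pyGetD adapters i 0) := by
  rcases adapters with _ | ⟨a, t⟩
  · rfl
  · set xs : List Int := a :: t with hxs
    have hn : (1 : Int) ≤ PySem.List.len xs := by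
      simp [PySem.List.len_eq, hxs]
    rw [PySem.List.enumerate_eq_map_pyRange (d := 0), List.filterMap_map]
    rw [PySem.List.pyRange_one_append 0 (PySem.List.len xs - 1) (PySem.List.len xs) (by omega) (by omega)]
    rw [List.filterMap_append]
    have h2 : (PySem.List.pyRange (PySem.List.len xs - 1) (PySem.List.len xs) 1).filterMap
        ((fun xy => if xy.1 + 1 < PySem.List.len xs
          then some (PySem.List.pyGetD xs (xy.1 + 1) 0 - xy.2) else none)
          ∘ (fun j => (j, PySem.List.pyGetD xs j 0))) = [] := by
      rw [List.filterMap_eq_nil_iff]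
      intro p hp
      rw [PySem.List.mem_pyRange_one] at hp
      simp only [Function.comp]
      rw [if_neg (by omega)]
    rw [h2, List.append_nil]
    apply filterMap_eq_map_of_forall
    intro j hj
    rw [PySem.List.mem_pyRange_one] at hj
    simp only [Function.comp]
    rw [if_pos (by omega)]

-- B's counting fold over a list of deltas, starting from the literal three-key dict
theorem foldB_eq (l : List Int) (a b c : Int) :
    l.foldl (fun d δ => if 1 ≤ δ ∧ δ ≤ 3 then d.modify δ 0 (· + 1) else d)
      (PySem.Dict.mk [(1, a), (2, b), (3, c)])
    = PySem.Dict.mk [(1, a + l.count 1), (2, b + l.count 2), (3, c + l.count 3)] := by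
  induction l generalizing a b c with
  | nil => simp
  | cons x t ih =>
    simp only [List.foldl_cons]
    by_cases h1 : x = 1
    · subst h1
      rw [if_pos (by omega)]
      have hm : (PySem.Dict.mk [((1:Int), a), (2, b), (3, c)]).modify 1 0 (· + 1)
          = PySem.Dict.mk [(1, a + 1), (2, b), (3, c)] := by simp [PySem.Dict.modify, PySem.Dict.insert, PySem.Dict.getD, PySem.Dict.get?]
      rw [hm, ih]
      simp
      omega
    · by_cases h2 : x = 2
      · subst h2
        rw [if_pos (by omega)]
        have hm : (PySem.Dict.mk [((1:Int), a), (2, b), (3, c)]).modify 2 0 (· + 1)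
            = PySem.Dict.mk [(1, a), (2, b + 1), (3, c)] := by simp [PySem.Dict.modify, PySem.Dict.insert, PySem.Dict.getD, PySem.Dict.get?]
        rw [hm, ih]
        simp
        omega
      · by_cases h3 : x = 3
        · subst h3
          rw [if_pos (by omega)]
          have hm : (PySem.Dict.mk [((1:Int), a), (2, b), (3, c)]).modify 3 0 (· + 1)
              = PySem.Dict.mk [(1, a), (2, b), (3, c + 1)] := by simp [PySem.Dict.modify, PySem.Dict.insert, PySem.Dict.getD, PySem.Dict.get?]
          rw [hm, ih]
          simp
          omega
        · by_cases hin : 1 ≤ x ∧ x ≤ 3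
          · exact absurd hin (by omega)
          · rw [if_neg hin, ih]
            simp [h1, h2, h3]

theorem ab_eq (adapters : List Int) : calc_jump_distribution adapters = calc_jump_distribution_alt adapters := by
  simp only [calc_jump_distribution, calc_jump_distribution_alt]
  rw [deltasA_eq]
  have hinit : (((PySem.Dict.empty : PySem.Dict Int Int).insert 1 0).insert 2 0).insert 3 0
      = PySem.Dict.mk [(1, 0), (2, 0), (3, 0)] := by decide
  rw [hinit]
  have hrange : PySem.List.pyRange 1 4 1 = [1, 2, 3] := by decide
  rw [hrange]
  set L := (PySem.List.pyRange 0 (PySem.List.len adapters - 1) 1).map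
      (fun i => PySem.List.pyGetD adapters (i + 1) 0 - PySem.List.pyGetD adapters i 0) with hL
  -- left side: three inserts on the literal dict
  simp only [List.foldl_cons, List.foldl_nil]
  have hi1 : (PySem.Dict.mk [((1:Int), (0:Int)), (2, 0), (3, 0)]).insert 1 (L.count 1 : Int)
      = PySem.Dict.mk [(1, (L.count 1 : Int)), (2, 0), (3, 0)] := by simp [PySem.Dict.insert]
  have hi2 : (PySem.Dict.mk [((1:Int), (L.count 1 : Int)), (2, 0), (3, 0)]).insert 2 (L.count 2 : Int)
      = PySem.Dict.mk [(1, (L.count 1 : Int)), (2, (L.count 2 : Int)), (3, 0)] := by simp [PySem.Dict.insert]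
  have hi3 : (PySem.Dict.mk [((1:Int), (L.count 1 : Int)), (2, (L.count 2 : Int)), (3, 0)]).insert 3 (L.count 3 : Int)
      = PySem.Dict.mk [(1, (L.count 1 : Int)), (2, (L.count 2 : Int)), (3, (L.count 3 : Int))] := by simp [PySem.Dict.insert]
  rw [hi1, hi2, hi3]
  -- right side: the fold over the range is the fold over the mapped delta list
  have hfold : (PySem.List.pyRange 0 (PySem.List.len adapters - 1) 1).foldl
      (fun d i =>
        if 1 ≤ PySem.List.pyGetD adapters (i + 1) 0 - PySem.List.pyGetD adapters i 0 ∧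
            PySem.List.pyGetD adapters (i + 1) 0 - PySem.List.pyGetD adapters i 0 ≤ 3
        then d.modify (PySem.List.pyGetD adapters (i + 1) 0 - PySem.List.pyGetD adapters i 0) 0 (· + 1)
        else d)
      (PySem.Dict.mk [((1:Int), (0:Int)), (2, 0), (3, 0)])
      = L.foldl (fun d δ => if 1 ≤ δ ∧ δ ≤ 3 then d.modify δ 0 (· + 1) else d)
          (PySem.Dict.mk [((1:Int), (0:Int)), (2, 0), (3, 0)]) := by
    rw [hL, List.foldl_map]
  have hfin := hfold.trans (foldB_eq L 0 0 0)
  have hz : PySem.Dict.mk [((1:Int), (0:Int) + (L.count 1 : Int)), (2, 0 + (L.count 2 : Int)), (3, 0 + (L.count 3 : Int))]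
      = PySem.Dict.mk [(1, (L.count 1 : Int)), (2, (L.count 2 : Int)), (3, (L.count 3 : Int))] := by
    norm_num
  exact (congrArg PySem.Dict.items (hfin.trans hz)).symm

-- ===== VERDICT =====
theorem calc_jump_distribution_spec : Claim_equal_calc_jump_distribution := fun adapters _ => ab_eq adapters
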